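-- pv_equiv track=rewrite | github.com/snacsnoc/bc-real-estate-dashboard | scripts/rollup_realtor_ca.py | price_band
-- ===== SOURCE A (Python) =====
-- from typing import Any, Dict, Iterable, List, Optional, Tuple
--
-- def price_band(value: Optional[int]) -> str:
--     if value is None:
--         return "Unknown"
--     bands: List[Tuple[Optional[int], Optional[int], str]] = [
--         (0, 250_000, "0-250k"),
--         (250_000, 500_000, "250k-500k"),
--         (500_000, 750_000, "500k-750k"),
--         (750_000, 1_000_000, "750k-1.0M"),
--         (1_000_000, 1_500_000, "1.0M-1.5M"),
--         (1_500_000, 2_000_000, "1.5M-2.0M"),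
--         (2_000_000, 3_000_000, "2.0M-3.0M"),
--         (3_000_000, 5_000_000, "3.0M-5.0M"),
--         (5_000_000, None, "5.0M+"),
--     ]
--     for low, high, label in bands:
--         if low is not None and value < low:
--             continue
--         if high is not None and value >= high:
--             continue
--         return label
--     return "Unknown"
-- ===== SOURCE B (Python) =====
-- _THRESHOLDS = [250_000, 500_000, 750_000, 1_000_000,
--                1_500_000, 2_000_000, 3_000_000, 5_000_000]
-- _LABELS = ["0-250k", "250k-500k", "500k-750k", "750k-1.0M",
--            "1.0M-1.5M", "1.5M-2.0M", "2.0M-3.0M", "3.0M-5.0M", "5.0M+"]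
--
-- def price_band(value):
--     if value is None or value < 0:
--         return "Unknown"
--     # binary search: index of first threshold strictly greater than value
--     lo, hi = 0, len(_THRESHOLDS)
--     while lo < hi:
--         mid = (lo + hi) // 2
--         if _THRESHOLDS[mid] <= value:
--             lo = mid + 1
--         else:
--             hi = mid
--     return _LABELS[lo]
-- ===== Notes on version B (the rewrite author's own statement) =====
-- stated objective: idiomatic
-- what changed: Replaced the linear scan over (low, high, label) tuples with a binary search over a sorted thresholds list indexing a parallel labels list (plus a negative-value guard matching the fall-through).
import Mathlib
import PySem

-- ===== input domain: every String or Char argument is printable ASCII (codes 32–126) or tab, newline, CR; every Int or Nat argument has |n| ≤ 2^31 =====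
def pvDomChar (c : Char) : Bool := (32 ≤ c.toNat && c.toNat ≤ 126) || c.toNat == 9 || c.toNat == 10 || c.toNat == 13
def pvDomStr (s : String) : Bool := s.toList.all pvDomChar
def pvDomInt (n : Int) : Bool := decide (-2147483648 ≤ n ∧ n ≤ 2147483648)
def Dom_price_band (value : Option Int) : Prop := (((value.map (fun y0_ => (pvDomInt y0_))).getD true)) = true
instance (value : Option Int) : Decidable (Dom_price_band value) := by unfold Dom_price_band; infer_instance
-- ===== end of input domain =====

-- B replaces A's linear scan over (low, high, label) tuples by a binary search over
-- sorted thresholds indexing a parallel labels list (objective: idiomatic).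

-- ===== PORT A =====
-- the bands table of A, verbatim
def pvBands : List (Option Int × Option Int × String) :=
  [(some 0, some 250000, "0-250k"),
   (some 250000, some 500000, "250k-500k"),
   (some 500000, some 750000, "500k-750k"),
   (some 750000, some 1000000, "750k-1.0M"),
   (some 1000000, some 1500000, "1.0M-1.5M"),
   (some 1500000, some 2000000, "1.5M-2.0M"),
   (some 2000000, some 3000000, "2.0M-3.0M"),
   (some 3000000, some 5000000, "3.0M-5.0M"),
   (some 5000000, none, "5.0M+")]

-- A's 'for … continue … return label' loop as structural recursion over the band list
def pvAloop (v : Int) : List (Option Int × Option Int × String) → String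
  | [] => "Unknown"
  | (low, high, label) :: rest =>
      if (match low with | some l => decide (v < l) | none => false) then pvAloop v rest
      else if (match high with | some h => decide (h ≤ v) | none => false) then pvAloop v rest
      else label

def price_band (value : Option Int) : String :=
  match value with
  | none => "Unknown"
  | some v => pvAloop v pvBands

-- ===== PORT B =====
def pvThresholds : List Int :=
  [250000, 500000, 750000, 1000000, 1500000, 2000000, 3000000, 5000000]

def pvLabels : List String :=
  ["0-250k", "250k-500k", "500k-750k", "750k-1.0M",
   "1.0M-1.5M", "1.5M-2.0M", "2.0M-3.0M", "3.0M-5.0M", "5.0M+"]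

-- Source B's while-loop binary search; _THRESHOLDS[mid] is always in range (lo < hi ≤ 8),
-- so getD is exact for Python's indexing here
def pvBSearch (v : Int) (lo hi : Nat) : Nat :=
  if lo < hi then
    let mid := (lo + hi) / 2
    if pvThresholds.getD mid 0 ≤ v then pvBSearch v (mid + 1) hi
    else pvBSearch v lo mid
  else lo
termination_by hi - lo
decreasing_by all_goals omega

def price_band_alt (value : Option Int) : String :=
  match value with
  | none => "Unknown"
  | some v =>
      if v < 0 then "Unknown"
      else pvLabels.getD (pvBSearch v 0 pvThresholds.length) ""

-- ===== PRECONDITION & SPEC =====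
def Spec_price_band (value : Option Int) (out : String) : Prop := out = price_band_alt value
instance (value : Option Int) (out : String) : Decidable (Spec_price_band value out) := by unfold Spec_price_band; infer_instance

-- ===== CLAIM (what is proved, stated in full; the proofs are below) =====
def Claim_equal_price_band : Prop := ∀ (value : Option Int), Dom_price_band value → Spec_price_band value (price_band value)

-- ===== LEMMAS AND PROOFS =====

-- ===== VERDICT (by name: the statement is the Claim_ definition above) =====
theorem price_band_spec : Claim_equal_price_band := by
  intro value _
  unfold Spec_price_band
  rcases value with _ | v
  · rfl
  · by_cases h0 : v < 0
    · simp [price_band, price_band_alt, pvAloop, pvBands, pvBSearch, pvThresholds, pvLabels,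
          show (v < (0:Int)) from by omega,
          show (v < (250000:Int)) from by omega,
          show (v < (500000:Int)) from by omega,
          show (v < (750000:Int)) from by omega,
          show (v < (1000000:Int)) from by omega,
          show (v < (1500000:Int)) from by omega,
          show (v < (2000000:Int)) from by omega,
          show (v < (3000000:Int)) from by omega,
          show (v < (5000000:Int)) from by omega,
          show ¬((0:Int) ≤ v) from by omega,
          show ¬((250000:Int) ≤ v) from by omega,
          show ¬((500000:Int) ≤ v) from by omega,
          show ¬((750000:Int) ≤ v) from by omega,
          show ¬((1000000:Int) ≤ v) from by omega,
          show ¬((1500000:Int) ≤ v) from by omega,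
          show ¬((2000000:Int) ≤ v) from by omega,
          show ¬((3000000:Int) ≤ v) from by omega,
          show ¬((5000000:Int) ≤ v) from by omega]
    · -- 0 ≤ v: nine bands
      by_cases h1 : v < 250000
      · simp [price_band, price_band_alt, pvAloop, pvBands, pvBSearch, pvThresholds, pvLabels,
          show ((0:Int) ≤ v) from by omega,
          show ¬(v < (0:Int)) from by omega,
          show ¬((250000:Int) ≤ v) from by omega,
          show (v < (250000:Int)) from by omega,
          show ¬((500000:Int) ≤ v) from by omega,
          show (v < (500000:Int)) from by omega,
          show ¬((750000:Int) ≤ v) from by omega,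
          show (v < (750000:Int)) from by omega,
          show ¬((1000000:Int) ≤ v) from by omega,
          show (v < (1000000:Int)) from by omega,
          show ¬((1500000:Int) ≤ v) from by omega,
          show (v < (1500000:Int)) from by omega,
          show ¬((2000000:Int) ≤ v) from by omega,
          show (v < (2000000:Int)) from by omega,
          show ¬((3000000:Int) ≤ v) from by omega,
          show (v < (3000000:Int)) from by omega,
          show ¬((5000000:Int) ≤ v) from by omega,
          show (v < (5000000:Int)) from by omega]
      by_cases h2 : v < 500000
      · simp [price_band, price_band_alt, pvAloop, pvBands, pvBSearch, pvThresholds, pvLabels,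
          show ((0:Int) ≤ v) from by omega,
          show ¬(v < (0:Int)) from by omega,
          show ((250000:Int) ≤ v) from by omega,
          show ¬(v < (250000:Int)) from by omega,
          show ¬((500000:Int) ≤ v) from by omega,
          show (v < (500000:Int)) from by omega,
          show ¬((750000:Int) ≤ v) from by omega,
          show (v < (750000:Int)) from by omega,
          show ¬((1000000:Int) ≤ v) from by omega,
          show (v < (1000000:Int)) from by omega,
          show ¬((1500000:Int) ≤ v) from by omega,
          show (v < (1500000:Int)) from by omega,
          show ¬((2000000:Int) ≤ v) from by omega,
          show (v < (2000000:Int)) from by omega,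
          show ¬((3000000:Int) ≤ v) from by omega,
          show (v < (3000000:Int)) from by omega,
          show ¬((5000000:Int) ≤ v) from by omega,
          show (v < (5000000:Int)) from by omega]
      by_cases h3 : v < 750000
      · simp [price_band, price_band_alt, pvAloop, pvBands, pvBSearch, pvThresholds, pvLabels,
          show ((0:Int) ≤ v) from by omega,
          show ¬(v < (0:Int)) from by omega,
          show ((250000:Int) ≤ v) from by omega,
          show ¬(v < (250000:Int)) from by omega,
          show ((500000:Int) ≤ v) from by omega,
          show ¬(v < (500000:Int)) from by omega,
          show ¬((750000:Int) ≤ v) from by omega,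
          show (v < (750000:Int)) from by omega,
          show ¬((1000000:Int) ≤ v) from by omega,
          show (v < (1000000:Int)) from by omega,
          show ¬((1500000:Int) ≤ v) from by omega,
          show (v < (1500000:Int)) from by omega,
          show ¬((2000000:Int) ≤ v) from by omega,
          show (v < (2000000:Int)) from by omega,
          show ¬((3000000:Int) ≤ v) from by omega,
          show (v < (3000000:Int)) from by omega,
          show ¬((5000000:Int) ≤ v) from by omega,
          show (v < (5000000:Int)) from by omega]
      by_cases h4 : v < 1000000
      · simp [price_band, price_band_alt, pvAloop, pvBands, pvBSearch, pvThresholds, pvLabels,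
          show ((0:Int) ≤ v) from by omega,
          show ¬(v < (0:Int)) from by omega,
          show ((250000:Int) ≤ v) from by omega,
          show ¬(v < (250000:Int)) from by omega,
          show ((500000:Int) ≤ v) from by omega,
          show ¬(v < (500000:Int)) from by omega,
          show ((750000:Int) ≤ v) from by omega,
          show ¬(v < (750000:Int)) from by omega,
          show ¬((1000000:Int) ≤ v) from by omega,
          show (v < (1000000:Int)) from by omega,
          show ¬((1500000:Int) ≤ v) from by omega,
          show (v < (1500000:Int)) from by omega,
          show ¬((2000000:Int) ≤ v) from by omega,
          show (v < (2000000:Int)) from by omega,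
          show ¬((3000000:Int) ≤ v) from by omega,
          show (v < (3000000:Int)) from by omega,
          show ¬((5000000:Int) ≤ v) from by omega,
          show (v < (5000000:Int)) from by omega]
      by_cases h5 : v < 1500000
      · simp [price_band, price_band_alt, pvAloop, pvBands, pvBSearch, pvThresholds, pvLabels,
          show ((0:Int) ≤ v) from by omega,
          show ¬(v < (0:Int)) from by omega,
          show ((250000:Int) ≤ v) from by omega,
          show ¬(v < (250000:Int)) from by omega,
          show ((500000:Int) ≤ v) from by omega,
          show ¬(v < (500000:Int)) from by omega,
          show ((750000:Int) ≤ v) from by omega,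
          show ¬(v < (750000:Int)) from by omega,
          show ((1000000:Int) ≤ v) from by omega,
          show ¬(v < (1000000:Int)) from by omega,
          show ¬((1500000:Int) ≤ v) from by omega,
          show (v < (1500000:Int)) from by omega,
          show ¬((2000000:Int) ≤ v) from by omega,
          show (v < (2000000:Int)) from by omega,
          show ¬((3000000:Int) ≤ v) from by omega,
          show (v < (3000000:Int)) from by omega,
          show ¬((5000000:Int) ≤ v) from by omega,
          show (v < (5000000:Int)) from by omega]
      by_cases h6 : v < 2000000
      · simp [price_band, price_band_alt, pvAloop, pvBands, pvBSearch, pvThresholds, pvLabels,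
          show ((0:Int) ≤ v) from by omega,
          show ¬(v < (0:Int)) from by omega,
          show ((250000:Int) ≤ v) from by omega,
          show ¬(v < (250000:Int)) from by omega,
          show ((500000:Int) ≤ v) from by omega,
          show ¬(v < (500000:Int)) from by omega,
          show ((750000:Int) ≤ v) from by omega,
          show ¬(v < (750000:Int)) from by omega,
          show ((1000000:Int) ≤ v) from by omega,
          show ¬(v < (1000000:Int)) from by omega,
          show ((1500000:Int) ≤ v) from by omega,
          show ¬(v < (1500000:Int)) from by omega,
          show ¬((2000000:Int) ≤ v) from by omega,
          show (v < (2000000:Int)) from by omega,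
          show ¬((3000000:Int) ≤ v) from by omega,
          show (v < (3000000:Int)) from by omega,
          show ¬((5000000:Int) ≤ v) from by omega,
          show (v < (5000000:Int)) from by omega]
      by_cases h7 : v < 3000000
      · simp [price_band, price_band_alt, pvAloop, pvBands, pvBSearch, pvThresholds, pvLabels,
          show ((0:Int) ≤ v) from by omega,
          show ¬(v < (0:Int)) from by omega,
          show ((250000:Int) ≤ v) from by omega,
          show ¬(v < (250000:Int)) from by omega,
          show ((500000:Int) ≤ v) from by omega,
          show ¬(v < (500000:Int)) from by omega,
          show ((750000:Int) ≤ v) from by omega,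
          show ¬(v < (750000:Int)) from by omega,
          show ((1000000:Int) ≤ v) from by omega,
          show ¬(v < (1000000:Int)) from by omega,
          show ((1500000:Int) ≤ v) from by omega,
          show ¬(v < (1500000:Int)) from by omega,
          show ((2000000:Int) ≤ v) from by omega,
          show ¬(v < (2000000:Int)) from by omega,
          show ¬((3000000:Int) ≤ v) from by omega,
          show (v < (3000000:Int)) from by omega,
          show ¬((5000000:Int) ≤ v) from by omega,
          show (v < (5000000:Int)) from by omega]
      by_cases h8 : v < 5000000
      · simp [price_band, price_band_alt, pvAloop, pvBands, pvBSearch, pvThresholds, pvLabels,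
          show ((0:Int) ≤ v) from by omega,
          show ¬(v < (0:Int)) from by omega,
          show ((250000:Int) ≤ v) from by omega,
          show ¬(v < (250000:Int)) from by omega,
          show ((500000:Int) ≤ v) from by omega,
          show ¬(v < (500000:Int)) from by omega,
          show ((750000:Int) ≤ v) from by omega,
          show ¬(v < (750000:Int)) from by omega,
          show ((1000000:Int) ≤ v) from by omega,
          show ¬(v < (1000000:Int)) from by omega,
          show ((1500000:Int) ≤ v) from by omega,
          show ¬(v < (1500000:Int)) from by omega,
          show ((2000000:Int) ≤ v) from by omega,
          show ¬(v < (2000000:Int)) from by omega,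
          show ((3000000:Int) ≤ v) from by omega,
          show ¬(v < (3000000:Int)) from by omega,
          show ¬((5000000:Int) ≤ v) from by omega,
          show (v < (5000000:Int)) from by omega]
      · simp [price_band, price_band_alt, pvAloop, pvBands, pvBSearch, pvThresholds, pvLabels,
          show ((0:Int) ≤ v) from by omega,
          show ¬(v < (0:Int)) from by omega,
          show ((250000:Int) ≤ v) from by omega,
          show ¬(v < (250000:Int)) from by omega,
          show ((500000:Int) ≤ v) from by omega,
          show ¬(v < (500000:Int)) from by omega,
          show ((750000:Int) ≤ v) from by omega,
          show ¬(v < (750000:Int)) from by omega,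
          show ((1000000:Int) ≤ v) from by omega,
          show ¬(v < (1000000:Int)) from by omega,
          show ((1500000:Int) ≤ v) from by omega,
          show ¬(v < (1500000:Int)) from by omega,
          show ((2000000:Int) ≤ v) from by omega,
          show ¬(v < (2000000:Int)) from by omega,
          show ((3000000:Int) ≤ v) from by omega,
          show ¬(v < (3000000:Int)) from by omega,
          show ((5000000:Int) ≤ v) from by omega,
          show ¬(v < (5000000:Int)) from by omega]
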